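-- pv_equiv track=rewrite | github.com/eetusa/Advent-of-Code-2022 | 3/q03.py | findCommonItemInNCompartments
-- ===== SOURCE A (Python) =====
-- def findCommonItemInNCompartments(compartments):
--     common = []
--     for idx, x in enumerate(compartments):
--         if (idx == 0):
--             for c in x:
--                 common.append(c)
--         else:
--             common_temp = common[:]
--             for c in common_temp:
--                 if c not in x:
--                     common.remove(c)
--     return common[0]
-- ===== SOURCE B (Python) =====
-- def findCommonItemInNCompartments(compartments):
--     counts = {}
--     for comp in compartments:
--         for ch in set(comp):
--             counts[ch] = counts.get(ch, 0) + 1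
--     n = len(compartments)
--     matches = [ch for ch in compartments[0] if counts[ch] == n]
--     return matches[0]
-- ===== Notes on version B (the rewrite author's own statement) =====
-- stated objective: alternative
-- what changed: Replaces A's per-compartment copy-the-list-and-list.remove intersection passes by a single frequency table (dict of per-compartment-deduped char counts); a char of the first compartment is common iff its count equals the number of compartments.
import Mathlib
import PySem

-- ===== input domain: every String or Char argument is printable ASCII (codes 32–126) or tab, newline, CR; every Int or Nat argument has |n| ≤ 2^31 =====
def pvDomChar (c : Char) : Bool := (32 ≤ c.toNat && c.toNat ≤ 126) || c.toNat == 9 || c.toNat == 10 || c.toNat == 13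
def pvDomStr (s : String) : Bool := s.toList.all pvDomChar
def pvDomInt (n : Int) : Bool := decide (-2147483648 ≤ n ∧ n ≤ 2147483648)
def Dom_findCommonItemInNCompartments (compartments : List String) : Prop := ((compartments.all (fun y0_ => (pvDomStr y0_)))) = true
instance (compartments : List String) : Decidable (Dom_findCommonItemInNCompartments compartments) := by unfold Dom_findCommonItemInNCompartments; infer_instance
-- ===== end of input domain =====

-- B replaces A's copy-and-remove intersection passes by a one-pass character frequency
-- table (objective: alternative algorithm, same measured cost).

-- ===== PORT A =====
-- A: common starts empty; the first compartment's chars are appended; each later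
-- compartment iterates a COPY of `common` and list.remove-s the chars absent from it;
-- returns common[0].  `(remove? …).getD common` is exact here: the removed char was
-- taken from the copy of `common`, so list.remove never raises ValueError.
def findCommonItemInNCompartments (compartments : List String) : String :=
  let common : List Char :=
    (PySem.List.enumerate compartments).foldl
      (fun common ix =>
        let idx := ix.1
        let x := ix.2
        if idx == 0 then
          x.toList.foldl (fun common c => common ++ [c]) common
        else
          let common_temp := common
          common_temp.foldl
            (fun common c =>
              if !(x.toList.contains c) then (PySem.List.remove? common c).getD common
              else common)
            common)
      []
  match PySem.List.pyGet? common 0 with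
  | some c => c.toString          -- common[0]; none = IndexError, excluded by Pre_
  | none => ""

-- ===== PORT B =====
def findCommonItemInNCompartments_alt (compartments : List String) : String :=
  let counts : PySem.Dict Char Int :=
    compartments.foldl
      (fun counts comp =>
        (PySem.Set.ofList comp.toList).foldl
          (fun counts ch => counts.modify ch 0 (· + 1))   -- counts[ch] = counts.get(ch, 0) + 1
          counts)
      PySem.Dict.empty
  let n : Int := compartments.length
  match PySem.List.pyGet? compartments 0 with   -- compartments[0]; none = IndexError, excluded by Pre_
  | some h =>
      let ms := h.toList.filter (fun ch => counts.getD ch 0 == n)   -- the 'matches' list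
      (match PySem.List.pyGet? ms 0 with        -- matches[0]; none = IndexError, excluded by Pre_
       | some c => c.toString
       | none => "")
  | none => ""

-- ===== PRECONDITION & SPEC =====
-- Pre_: exactly the inputs on which Python A returns (both Pythons raise IndexError
-- elsewhere): the list is nonempty and some char of its first string occurs in every later one.
def Pre_findCommonItemInNCompartments (compartments : List String) : Prop :=
  compartments ≠ [] ∧
    ((compartments.headD "").toList.any
      (fun c => compartments.tail.all (fun s => s.toList.contains c))) = true
instance (compartments : List String) : Decidable (Pre_findCommonItemInNCompartments compartments) := by unfold Pre_findCommonItemInNCompartments; infer_instance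

def pvWitness_findCommonItemInNCompartments : List String := ["ab", "cb"]

def Spec_findCommonItemInNCompartments (compartments : List String) (out : String) : Prop := out = findCommonItemInNCompartments_alt compartments
instance (compartments : List String) (out : String) : Decidable (Spec_findCommonItemInNCompartments compartments out) := by unfold Spec_findCommonItemInNCompartments; infer_instance

-- ===== CLAIM (what is proved, stated in full; the proofs are below) =====
def Claim_equal_findCommonItemInNCompartments : Prop := ∀ (compartments : List String), Dom_findCommonItemInNCompartments compartments → Pre_findCommonItemInNCompartments compartments → Spec_findCommonItemInNCompartments compartments (findCommonItemInNCompartments compartments)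

-- ===== LEMMAS AND PROOFS =====

-- the body of A's inner removal loop, named so rewriting under it is possible
def stepA (x : List Char) (common : List Char) (c : Char) : List Char :=
  if !(x.contains c) then (PySem.List.remove? common c).getD common else common

-- list.remove on pre ++ c :: rest removes exactly that c when c does not occur in pre
theorem remove_append_cons {pre rest : List Char} {c : Char} (h : c ∉ pre) :
    (PySem.List.remove? (pre ++ c :: rest) c).getD (pre ++ c :: rest) = pre ++ rest := by
  induction pre with
  | nil => simp
  | cons a pre ih =>
      have ha : a ≠ c := by intro e; exact h (by simp [e])
      have h' : c ∉ pre := fun m => h (List.mem_cons_of_mem _ m)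
      have hsome : PySem.List.remove? (pre ++ c :: rest) c = some (pre ++ rest) := by
        cases hr : PySem.List.remove? (pre ++ c :: rest) c with
        | none =>
            exact absurd ((PySem.List.remove?_eq_none_iff _ _).mp hr) (by simp)
        | some l => simpa [hr] using ih h'
      simp [PySem.List.remove?_cons_of_ne _ ha, hsome]

-- one inner pass of A (iterate a copy, remove the chars absent from x) is a filter
theorem pass_filter (x : List Char) :
    ∀ (rest pre : List Char), (∀ a ∈ pre, a ∈ x) →
    rest.foldl (stepA x) (pre ++ rest) = pre ++ rest.filter (fun c => x.contains c) := by
  intro rest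
  induction rest with
  | nil => intro pre _; simp
  | cons c rest ih =>
      intro pre hpre
      simp only [List.foldl_cons]
      by_cases hm : c ∈ x
      · have hstep : stepA x (pre ++ c :: rest) c = (pre ++ [c]) ++ rest := by
          simp [stepA, hm]
        have h2 : ∀ a ∈ pre ++ [c], a ∈ x := by
          intro a ha
          rcases List.mem_append.mp ha with hh | hh
          · exact hpre a hh
          · simp at hh; subst hh; exact hm
        rw [hstep, ih (pre ++ [c]) h2]
        simp [hm]
      · have hcp : c ∉ pre := fun m => hm (hpre c m)
        have hstep : stepA x (pre ++ c :: rest) c = pre ++ rest := by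
          simp only [stepA]
          rw [if_pos (by simpa using hm)]
          exact remove_append_cons hcp
        rw [hstep, ih pre hpre]
        simp [hm]

-- A's whole loop over the tail compartments is iterated filtering
theorem tail_filter (t : List String) :
    ∀ (base : List Char),
    t.foldl (fun common x => common.foldl (stepA x.toList) common) base
    = base.filter (fun c => t.all (fun s => s.toList.contains c)) := by
  induction t with
  | nil => intro base; simp
  | cons s t ih =>
      intro base
      simp only [List.foldl_cons]
      have h := pass_filter s.toList base [] (by simp)
      simp only [List.nil_append] at h
      rw [h, ih, List.filter_filter]
      apply List.filter_congr
      intro c _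
      simp [List.all_cons, Bool.and_comm]

-- B's frequency table counts, for each char, the compartments containing it
theorem counts_getD (comps : List String) :
    ∀ (d : PySem.Dict Char Int) (ch : Char),
    (comps.foldl
      (fun counts comp =>
        (PySem.Set.ofList comp.toList).foldl
          (fun counts ch => counts.modify ch 0 (· + 1)) counts)
      d).getD ch 0
    = d.getD ch 0 + (comps.countP (fun s => s.toList.contains ch) : Int) := by
  induction comps with
  | nil => intro d ch; simp
  | cons comp comps ih =>
      intro d ch
      simp only [List.foldl_cons]
      rw [ih, PySem.Dict.getD_foldl_modify_add_one]
      have hcnt : (PySem.Set.ofList comp.toList).count ch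
          = if comp.toList.contains ch then 1 else 0 := by
        by_cases hm : ch ∈ comp.toList
        · rw [if_pos (by simpa using hm)]
          exact List.count_eq_one_of_mem (PySem.Set.nodup_ofList _)
            ((PySem.Set.mem_ofList _ _).mpr hm)
        · rw [if_neg (by simpa using hm)]
          exact List.count_eq_zero.mpr (fun hc => hm ((PySem.Set.mem_ofList _ _).mp hc))
      rw [List.countP_cons, hcnt]
      by_cases hc : ch ∈ comp.toList
      · simp [hc]
        ring
      · simp [hc]

-- the two ports agree on EVERY input (outside Pre_ both Pythons raise IndexError
-- and both ports take the "" fallback)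
theorem ports_agree (compartments : List String) :
    findCommonItemInNCompartments compartments = findCommonItemInNCompartments_alt compartments := by
  cases compartments with
  | nil => rfl
  | cons h t =>
      simp only [findCommonItemInNCompartments, findCommonItemInNCompartments_alt]
      rw [show PySem.List.enumerate (h :: t) 0 = (0, h) :: PySem.List.enumerate t 1 from rfl]
      simp only [List.foldl_cons]
      rw [show (if ((0 : Int) == 0) = true then List.foldl (fun common c => common ++ [c]) [] h.toList
          else
            List.foldl
              (fun common c =>
                if (!h.toList.contains c) = true then (PySem.List.remove? common c).getD common else common)
              [] []) = h.toList from by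
        simpa using PySem.List.foldl_append_singleton_eq_self h.toList []]
      -- the enumerate indices over the tail are >= 1, so the else branch always runs
      have henum : ∀ (u : List String) (k : Int) (base : List Char), 1 ≤ k →
          List.foldl
            (fun common ix =>
              if (ix.1 == 0) = true then List.foldl (fun common c => common ++ [c]) common ix.2.toList
              else
                List.foldl
                  (fun common c =>
                    if (!ix.2.toList.contains c) = true then (PySem.List.remove? common c).getD common
                    else common)
                  common common)
            base (PySem.List.enumerate u k)
          = u.foldl (fun common x => common.foldl (stepA x.toList) common) base := by
        intro u
        induction u with
        | nil => intro k base _; rfl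
        | cons s u iht =>
            intro k base hk
            rw [show PySem.List.enumerate (s :: u) k = (k, s) :: PySem.List.enumerate u (k + 1) from rfl]
            simp only [List.foldl_cons]
            rw [if_neg (by simp; omega)]
            exact iht (k + 1) _ (by omega)
      rw [henum t 1 h.toList (by omega), tail_filter]
      simp only [PySem.List.pyGet?_zero_cons]
      -- compare the two filtered lists pointwise over the first compartment
      have hfeq : h.toList.filter (fun c => t.all (fun s => s.toList.contains c))
          = h.toList.filter (fun ch =>
              ((h :: t).foldl
                (fun counts comp =>
                  (PySem.Set.ofList comp.toList).foldl
                    (fun counts ch => counts.modify ch 0 (· + 1)) counts)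
                PySem.Dict.empty).getD ch 0 == ((h :: t).length : Int)) := by
        apply List.filter_congr
        intro c hc
        rw [counts_getD]
        have hd : (PySem.Dict.empty : PySem.Dict Char Int).getD c 0 = 0 := rfl
        rw [hd, List.countP_cons]
        rw [if_pos (by simpa using hc)]
        simp only [List.length_cons, zero_add]
        by_cases hall : ∀ s ∈ t, s.toList.contains c = true
        · rw [List.countP_eq_length.mpr hall, List.all_eq_true.mpr hall]
          simp
        · have hne : t.countP (fun s => s.toList.contains c) ≠ t.length :=
            fun e => hall (List.countP_eq_length.mp e)
          have hA : t.all (fun s => s.toList.contains c) = false := by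
            rw [Bool.eq_false_iff]
            intro hcontra
            exact hall (List.all_eq_true.mp hcontra)
          rw [hA]
          symm
          rw [beq_eq_false_iff_ne]
          intro e
          exact hne (by omega)
      rw [hfeq]
      simp only [List.foldl_cons]

-- ===== VERDICT (by name: the statement is the Claim_ definition above) =====
theorem findCommonItemInNCompartments_spec : Claim_equal_findCommonItemInNCompartments := by
  intro compartments _ _
  exact ports_agree compartments
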